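-- pv_equiv track=rewrite | github.com/DKU-STUDY/Algorithm | BOJ/17829.222-풀링/6047198844.py | polling
-- ===== SOURCE A (Python) =====
-- def polling(arr):
--     if len(arr) == 1:
--         return arr[0][0]
--     new_arr = list()
--     # 새로운 어레이 구성
--     for i in range(0, len(arr), 2):
--         row = list()
--         for j in range(0, len(arr[0]), 2):
--             row.append(list(sorted([arr[i][j], arr[i][j + 1], arr[i + 1][j], arr[i + 1][j + 1]]))[2])
--         new_arr.append(row)
--     return polling(new_arr)
-- ===== SOURCE B (Python) =====
-- def _pool_rows(r1, r2):
--     out = []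
--     while len(r1) >= 2 and len(r2) >= 2:
--         a, b, r1 = r1[0], r1[1], r1[2:]
--         c, d, r2 = r2[0], r2[1], r2[2:]
--         out.append(sorted([a, b, c, d])[2])
--     return out
--
--
-- def polling(arr):
--     while len(arr) > 1:
--         new = []
--         rest = arr
--         while len(rest) >= 2:
--             r1, r2, rest = rest[0], rest[1], rest[2:]
--             new.append(_pool_rows(r1, r2))
--         arr = new
--     return arr[0][0]
-- ===== Notes on version B (the rewrite author's own statement) =====
-- stated objective: alternative
-- what changed: A recurses over grid levels with index arithmetic (two nested for-ranges with stride 2 and arr[i][j] lookups); B is an index-free iterative loop that structurally consumes two rows at a time and, inside each pair, two elements of each row at a time.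
import Mathlib
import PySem

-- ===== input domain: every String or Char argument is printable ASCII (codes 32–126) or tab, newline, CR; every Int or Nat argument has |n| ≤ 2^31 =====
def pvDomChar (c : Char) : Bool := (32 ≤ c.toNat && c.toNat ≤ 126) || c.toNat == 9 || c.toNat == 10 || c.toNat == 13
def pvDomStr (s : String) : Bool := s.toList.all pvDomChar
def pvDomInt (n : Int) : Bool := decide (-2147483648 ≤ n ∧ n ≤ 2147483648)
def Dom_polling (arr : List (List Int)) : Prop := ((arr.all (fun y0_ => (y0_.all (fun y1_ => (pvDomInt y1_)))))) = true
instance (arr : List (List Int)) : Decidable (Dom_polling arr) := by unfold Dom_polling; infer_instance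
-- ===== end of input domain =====

-- B replaces A's index-arithmetic recursion over grid levels (range(0, n, 2) with arr[i][j] lookups)
-- by an index-free loop that structurally consumes rows and elements two at a time; objective: alternative decomposition.

-- ===== PORT A =====
-- second-largest of a quad: list(sorted([a, b, c, d]))[2] — appears verbatim in both Pythons
def quadPick (a b c d : Int) : Int :=
  PySem.List.pyGetD (PySem.List.sorted [a, b, c, d] (fun x => x) false) 2 0

-- one level of A: the two nested 'for … in range(0, …, 2)' loops building new_arr
def pollingStep (arr : List (List Int)) : List (List Int) :=
  (PySem.List.pyRange 0 (arr.length : Int) 2).foldl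
    (fun new_arr i =>
      new_arr ++ [(PySem.List.pyRange 0 (((arr.headD []).length : Int)) 2).foldl
        (fun row j =>
          row ++ [quadPick (PySem.List.pyGetD (PySem.List.pyGetD arr i []) j 0)
                           (PySem.List.pyGetD (PySem.List.pyGetD arr i []) (j + 1) 0)
                           (PySem.List.pyGetD (PySem.List.pyGetD arr (i + 1) []) j 0)
                           (PySem.List.pyGetD (PySem.List.pyGetD arr (i + 1) []) (j + 1) 0)]) []]) []

-- A's recursion, made total with fuel (depth ≤ arr.length suffices on Pre_; A diverges/raises outside it)
def pollingFuel : Nat → List (List Int) → Int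
  | 0, _ => 0
  | f + 1, arr =>
    if arr.length = 1 then PySem.List.pyGetD (PySem.List.pyGetD arr 0 []) 0 0
    else pollingFuel f (pollingStep arr)

def polling (arr : List (List Int)) : Int := pollingFuel (arr.length + 1) arr

-- ===== PORT B =====
-- Source B's inner while loop: consume two elements of each row at a time, no indices
def poolRows : List Int → List Int → List Int
  | a :: b :: r1, c :: d :: r2 => quadPick a b c d :: poolRows r1 r2
  | _, _ => []

-- Source B's middle while loop: consume two rows at a time
def pairRows : List (List Int) → List (List Int)
  | r1 :: r2 :: rest => poolRows r1 r2 :: pairRows rest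
  | _ => []

-- needed by polling_alt's decreasing_by
lemma pairRows_length (l : List (List Int)) : (pairRows l).length = l.length / 2 := by
  induction l using pairRows.induct with
  | case1 r1 r2 rest ih => simp [pairRows, ih]; omega
  | case2 l h => cases l with
    | nil => simp [pairRows]
    | cons r t => cases t with
      | nil => simp [pairRows]
      | cons r2 t2 => exact absurd rfl (h r r2 t2)

-- Source B's outer 'while len(arr) > 1' loop
def polling_alt (arr : List (List Int)) : Int :=
  if 1 < arr.length then polling_alt (pairRows arr)
  else PySem.List.pyGetD (PySem.List.pyGetD arr 0 []) 0 0
termination_by arr.length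
decreasing_by rw [pairRows_length]; omega

-- ===== PRECONDITION & SPEC =====
-- Pre_ = exactly the inputs on which A returns: a power-of-two number of rows, row 0 of nonzero
-- length divisible by the row count, and every row at least as long as row 0 (A reads only the
-- first len(arr[0]) entries of each row and ignores any extras).  Outside Pre_ A raises an
-- IndexError or hits the recursion limit.
def Pre_polling (arr : List (List Int)) : Prop :=
  arr ≠ [] ∧ (∃ k ≤ arr.length, arr.length = 2 ^ k) ∧
  (∀ row ∈ arr, (arr.headD []).length ≤ row.length) ∧
  (arr.length ∣ (arr.headD []).length) ∧ (arr.headD []).length ≠ 0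

instance (arr : List (List Int)) : Decidable (Pre_polling arr) := by
  unfold Pre_polling; infer_instance

def pvWitness_polling : List (List Int) := [[1, 2], [3, 4]]

def Spec_polling (arr : List (List Int)) (out : Int) : Prop := out = polling_alt arr
instance (arr : List (List Int)) (out : Int) : Decidable (Spec_polling arr out) := by unfold Spec_polling; infer_instance

-- ===== CLAIM (what is proved, stated in full; the proofs are below) =====
def Claim_equal_polling : Prop := ∀ (arr : List (List Int)), Dom_polling arr → Pre_polling arr → Spec_polling arr (polling arr)

-- ===== LEMMAS AND PROOFS =====

lemma pyRange_two (n : Nat) (h : 2 ∣ n) :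
    PySem.List.pyRange 0 (n : Int) 2 = (List.range (n / 2)).map (fun k : Nat => 2 * (k : Int)) := by
  rw [PySem.List.pyRange_of_pos 0 (n : Int) (by norm_num)]
  obtain ⟨p, rfl⟩ := h
  rcases Nat.eq_zero_or_pos p with rfl | hp
  · simp
  · have h1 : (0 : Int) < ((2 * p : Nat) : Int) := by positivity
    rw [if_pos h1]
    have h2 : ((((2 * p : Nat) : Int) - 0 + 2 - 1) / 2).toNat = p := by omega
    rw [h2, Nat.mul_div_cancel_left p (by norm_num)]
    apply List.map_congr_left
    intro k _; ring

-- normal form of one row of A's inner loop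
def rowMap (r1 r2 : List Int) (m : Nat) : List Int :=
  (List.range m).map (fun t =>
    quadPick (r1.getD (2 * t) 0) (r1.getD (2 * t + 1) 0) (r2.getD (2 * t) 0) (r2.getD (2 * t + 1) 0))

lemma rowMap_eq_poolRows (m : Nat) : ∀ (r1 r2 : List Int), r1.length = 2 * m → r2.length = 2 * m →
    rowMap r1 r2 m = poolRows r1 r2 := by
  induction m with
  | zero =>
    intro r1 r2 h1 h2
    rw [List.length_eq_zero_iff.mp h1, List.length_eq_zero_iff.mp h2]
    simp [rowMap, poolRows]
  | succ p ih =>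
    intro r1 r2 h1 h2
    match r1, r2 with
    | a :: b :: t1, c :: d :: t2 =>
      rw [rowMap, List.range_succ_eq_map, List.map_cons, List.map_map]
      simp only [Function.comp_def]
      have e1 : ∀ (t : Nat) (x y : Int) (l : List Int), (x :: y :: l).getD (2 * t + 2) 0 = l.getD (2 * t) 0 := by
        intro t x y l; simp
      have e2 : ∀ (t : Nat) (x y : Int) (l : List Int), (x :: y :: l).getD (2 * t + 2 + 1) 0 = l.getD (2 * t + 1) 0 := by
        intro t x y l; simp
      rw [poolRows]
      congr 1
      rw [← ih t1 t2 (by simp at h1; omega) (by simp at h2; omega), rowMap]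
      apply List.map_congr_left
      intro t _
      have ht : 2 * t.succ = 2 * t + 2 := by omega
      rw [ht, e1, e2, e1, e2]

lemma poolRows_length (r1 r2 : List Int) (m : Nat) (h1 : r1.length = 2 * m) (h2 : r2.length = 2 * m) :
    (poolRows r1 r2).length = m := by
  rw [← rowMap_eq_poolRows m r1 r2 h1 h2]; simp [rowMap]

lemma pairRows_rows (m : Nat) : ∀ (l : List (List Int)), (∀ row ∈ l, row.length = 2 * m) →
    ∀ row ∈ pairRows l, row.length = m := by
  intro l
  induction l using pairRows.induct with
  | case1 r1 r2 rest ih =>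
    intro h row hrow
    rw [pairRows] at hrow
    rcases List.mem_cons.mp hrow with rfl | hmem
    · exact poolRows_length r1 r2 m (h r1 (by simp)) (h r2 (by simp))
    · exact ih (fun r hr => h r (by simp [hr])) row hmem
  | case2 l h =>
    intro _ row hrow
    cases l with
    | nil => simp [pairRows] at hrow
    | cons r t => cases t with
      | nil => simp [pairRows] at hrow
      | cons r2 t2 => exact absurd rfl (h r r2 t2)

lemma grid_aux (m : Nat) : ∀ (q : Nat) (arr : List (List Int)), arr.length = 2 * q →
    (∀ row ∈ arr, row.length = 2 * m) →
    (List.range q).map (fun k => rowMap (arr.getD (2 * k) []) (arr.getD (2 * k + 1) []) m) = pairRows arr := by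
  intro q
  induction q with
  | zero =>
    intro arr hlen _
    rw [List.length_eq_zero_iff.mp hlen]
    simp [pairRows]
  | succ p ih =>
    intro arr hlen hm
    match arr, hlen with
    | r1 :: r2 :: rest, hlen =>
      rw [List.range_succ_eq_map, List.map_cons, List.map_map, pairRows]
      congr 1
      · exact rowMap_eq_poolRows m r1 r2 (hm r1 (by simp)) (hm r2 (by simp))
      · rw [← ih rest (by simp at hlen; omega) (fun r hr => hm r (by simp [hr]))]
        apply List.map_congr_left
        intro k _
        have ht : 2 * (Nat.succ k) = 2 * k + 2 := by omega
        simp only [Function.comp_def, ht]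
        rfl

lemma getD_take (r : List Int) (t j : Nat) (h : j < t) : (r.take t).getD j 0 = r.getD j 0 := by
  simp [List.getD, h]

lemma getD_map_take (l : List (List Int)) (t i : Nat) :
    (l.map (List.take t)).getD i [] = (l.getD i []).take t := by
  simp [List.getD, List.getElem?_map]
  cases l[i]? <;> simp

lemma rowMap_take (r1 r2 : List Int) (m : Nat) :
    rowMap (r1.take (2 * m)) (r2.take (2 * m)) m = rowMap r1 r2 m := by
  unfold rowMap
  apply List.map_congr_left
  intro t ht
  have ht' := List.mem_range.mp ht
  rw [getD_take _ _ _ (by omega), getD_take _ _ _ (by omega),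
      getD_take _ _ _ (by omega), getD_take _ _ _ (by omega)]

lemma poolRows_nil_of_short (l1 l2 : List Int) (hl : l1.length < 2 ∨ l2.length < 2) :
    poolRows l1 l2 = [] := by
  match l1, l2 with
  | [], _ => rfl
  | [a], _ => rfl
  | a :: b :: t, [] => rfl
  | a :: b :: t, [c] => rfl
  | a :: b :: t, c :: d :: t2 => simp at hl

lemma take_poolRows : ∀ (r1 r2 : List Int) (w : Nat),
    poolRows (r1.take (2 * w)) (r2.take (2 * w)) = (poolRows r1 r2).take w := by
  intro r1 r2
  induction r1, r2 using poolRows.induct with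
  | case1 a b t1 c d t2 ih =>
    intro w
    cases w with
    | zero => simp [poolRows]
    | succ w' =>
      have h2 : 2 * (w' + 1) = 2 * w' + 1 + 1 := by omega
      rw [h2]
      simp only [List.take_succ_cons]
      rw [poolRows, poolRows, ih w']
      simp
  | case2 r1 r2 h =>
    intro w
    have hcase : r1.length < 2 ∨ r2.length < 2 := by
      match r1, r2 with
      | [], _ => simp
      | [a], _ => simp
      | a :: b :: t, [] => simp
      | a :: b :: t, [c] => simp
      | a :: b :: t, c :: d :: t2 => exact absurd (h a b t c d t2 rfl rfl) (by simp)
    rw [poolRows_nil_of_short r1 r2 hcase, List.take_nil]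
    apply poolRows_nil_of_short
    rcases hcase with h1 | h1
    · exact Or.inl (by simp [List.length_take]; omega)
    · exact Or.inr (by simp [List.length_take]; omega)

lemma pairRows_nil_of_short (g : List (List Int)) (hg : g.length < 2) : pairRows g = [] := by
  match g with
  | [] => rfl
  | [r] => rfl
  | r1 :: r2 :: t => simp at hg

lemma mapTake_pairRows (w : Nat) : ∀ (g : List (List Int)),
    pairRows (g.map (List.take (2 * w))) = (pairRows g).map (List.take w) := by
  intro g
  induction g using pairRows.induct with
  | case1 r1 r2 rest ih =>
    simp only [List.map_cons]
    rw [pairRows, pairRows, take_poolRows, ih]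
    simp
  | case2 g h =>
    have hg : g.length < 2 := by
      match g with
      | [] => simp
      | [r] => simp
      | r1 :: r2 :: t => exact absurd (h r1 r2 t rfl) (by simp)
    rw [pairRows_nil_of_short g hg, pairRows_nil_of_short _ (by simp [hg]), List.map_nil]

lemma pairRows_rows_ge (m : Nat) (l : List (List Int)) (hm : ∀ row ∈ l, 2 * m ≤ row.length) :
    ∀ row ∈ pairRows l, m ≤ row.length := by
  induction l using pairRows.induct with
  | case1 r1 r2 rest ih =>
    intro row hrow
    rw [pairRows] at hrow
    rcases List.mem_cons.mp hrow with rfl | hmem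
    · have hr1 := hm r1 (by simp)
      have hr2 := hm r2 (by simp)
      have h1 : (r1.take (2 * m)).length = 2 * m := by simp [List.length_take]; omega
      have h2 : (r2.take (2 * m)).length = 2 * m := by simp [List.length_take]; omega
      have hlen : ((poolRows r1 r2).take m).length = m := by
        rw [← take_poolRows, poolRows_length _ _ m h1 h2]
      simp [List.length_take] at hlen
      omega
    · exact ih (fun r hr => hm r (by simp [hr])) row hmem
  | case2 l h =>
    intro row hrow
    have hg : l.length < 2 := by
      match l with
      | [] => simp
      | [r] => simp
      | r1 :: r2 :: t => exact absurd (h r1 r2 t rfl) (by simp)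
    rw [pairRows_nil_of_short l hg] at hrow
    simp at hrow

lemma headD_mem (l : List (List Int)) (h : l ≠ []) : l.headD [] ∈ l := by
  cases l with
  | nil => exact absurd rfl h
  | cons r t => simp

lemma step_eq (arr : List (List Int)) (m q : Nat) (hlen : arr.length = 2 * q)
    (hm : ∀ row ∈ arr, 2 * m ≤ row.length) (hhead : (arr.headD []).length = 2 * m) :
    pollingStep arr = pairRows (arr.map (List.take (2 * m))) := by
  unfold pollingStep
  rw [hhead, hlen, pyRange_two (2 * q) ⟨q, rfl⟩, pyRange_two (2 * m) ⟨m, rfl⟩]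
  simp only [PySem.List.foldl_append_singleton_eq_map, List.nil_append, List.map_map]
  simp only [Nat.mul_div_cancel_left _ (by norm_num : 0 < 2)]
  rw [← grid_aux m q (arr.map (List.take (2 * m))) (by simp [hlen])
      (fun r hr => by
        obtain ⟨r0, hr0, rfl⟩ := List.mem_map.mp hr
        have := hm r0 hr0
        simp [List.length_take]; omega)]
  apply List.map_congr_left
  intro k _
  rw [getD_map_take, getD_map_take, rowMap_take, rowMap]
  apply List.map_congr_left
  intro t _
  simp only [Function.comp_def]
  have c1 : ∀ (j : Nat) (l : List (List Int)), PySem.List.pyGetD l (2 * (j : Int)) [] = l.getD (2 * j) [] := by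
    intro j l
    rw [show (2 * (j : Int)) = ((2 * j : Nat) : Int) by push_cast; ring, PySem.List.pyGetD_natCast]
  have c2 : ∀ (j : Nat) (l : List Int), PySem.List.pyGetD l (2 * (j : Int)) 0 = l.getD (2 * j) 0 := by
    intro j l
    rw [show (2 * (j : Int)) = ((2 * j : Nat) : Int) by push_cast; ring, PySem.List.pyGetD_natCast]
  have c3 : ∀ (j : Nat) (l : List Int), PySem.List.pyGetD l (2 * (j : Int) + 1) 0 = l.getD (2 * j + 1) 0 := by
    intro j l
    rw [show (2 * (j : Int) + 1) = ((2 * j + 1 : Nat) : Int) by push_cast; ring, PySem.List.pyGetD_natCast]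
  have c4 : ∀ (j : Nat) (l : List (List Int)), PySem.List.pyGetD l (2 * (j : Int) + 1) [] = l.getD (2 * j + 1) [] := by
    intro j l
    rw [show (2 * (j : Int) + 1) = ((2 * j + 1 : Nat) : Int) by push_cast; ring, PySem.List.pyGetD_natCast]
  rw [c1, c4, c2, c2, c3, c3]

lemma norm_eq (k : Nat) : ∀ (g : List (List Int)) (w : Nat), g.length = 2 ^ k →
    (∀ row ∈ g, w ≤ row.length) → 2 ^ k ∣ w → w ≠ 0 →
    polling_alt (g.map (List.take w)) = polling_alt g := by
  induction k with
  | zero =>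
    intro g w hlen hrow _ hw0
    obtain ⟨r, rfl⟩ := List.length_eq_one_iff.mp (by simpa using hlen)
    rw [polling_alt, if_neg (by simp), polling_alt, if_neg (by simp)]
    have hr := hrow r (by simp)
    obtain ⟨w', rfl⟩ := Nat.exists_eq_succ_of_ne_zero hw0
    cases r with
    | nil => simp at hr
    | cons x r' => simp [List.take_succ_cons]
  | succ p ih =>
    intro g w hlen hrow hdvd hw0
    have h2 : 2 ≤ 2 ^ (p + 1) := by
      have := Nat.one_lt_two_pow_iff.mpr (show p + 1 ≠ 0 by omega); omega
    obtain ⟨w', rfl⟩ : 2 ∣ w := dvd_trans ⟨2 ^ p, by ring⟩ hdvd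
    rw [polling_alt, if_pos (by simp [hlen])]
    conv_rhs => rw [polling_alt, if_pos (by omega)]
    rw [mapTake_pairRows]
    apply ih (pairRows g) w'
    · rw [pairRows_length, hlen, pow_succ]
      exact Nat.mul_div_cancel _ (by norm_num)
    · exact pairRows_rows_ge w' g hrow
    · obtain ⟨c, hc⟩ := hdvd
      have hc' : 2 * w' = 2 * (2 ^ p * c) := by rw [hc, pow_succ]; ring
      exact ⟨c, by omega⟩
    · omega

lemma main_eq (k : Nat) : ∀ (f : Nat) (arr : List (List Int)) (m : Nat), arr.length = 2 ^ k →
    (∀ row ∈ arr, m ≤ row.length) → (arr.headD []).length = m → 2 ^ k ∣ m → m ≠ 0 → k < f →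
    pollingFuel f arr = polling_alt arr := by
  induction k with
  | zero =>
    intro f arr m hlen hm hhead hdvd hm0 hf
    match f, hf with
    | f' + 1, _ =>
      rw [pollingFuel, if_pos (by simpa using hlen), polling_alt,
        if_neg (by simp only [pow_zero] at hlen; omega)]
  | succ p ih =>
    intro f arr m hlen hm hhead hdvd hm0 hf
    match f, hf with
    | f' + 1, _ =>
      have h2 : 2 ≤ 2 ^ (p + 1) := by
        have := Nat.one_lt_two_pow_iff.mpr (show p + 1 ≠ 0 by omega); omega
      obtain ⟨m', rfl⟩ : 2 ∣ m := dvd_trans ⟨2 ^ p, by ring⟩ hdvd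
      have hp2 : (pairRows (arr.map (List.take (2 * m')))).length = 2 ^ p := by
        rw [pairRows_length, List.length_map, hlen, pow_succ]
        exact Nat.mul_div_cancel _ (by norm_num)
      have hrows' : ∀ row ∈ pairRows (arr.map (List.take (2 * m'))), row.length = m' := by
        apply pairRows_rows
        intro r hr
        obtain ⟨r0, hr0, rfl⟩ := List.mem_map.mp hr
        have := hm r0 hr0
        simp [List.length_take]; omega
      have hdvd' : 2 ^ p ∣ m' := by
        obtain ⟨c, hc⟩ := hdvd
        have hc' : 2 * m' = 2 * (2 ^ p * c) := by rw [hc, pow_succ]; ring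
        exact ⟨c, by omega⟩
      rw [pollingFuel, if_neg (by omega),
        step_eq arr m' (2 ^ p) (by rw [hlen]; ring) hm hhead]
      rw [ih f' (pairRows (arr.map (List.take (2 * m')))) m' hp2
        (fun r hr => (hrows' r hr).ge)
        (hrows' _ (headD_mem _ (by intro hnil; rw [hnil] at hp2; simp at hp2; omega)))
        hdvd' (by omega) (by omega)]
      conv_rhs => rw [polling_alt, if_pos (by omega)]
      rw [mapTake_pairRows]
      apply norm_eq p (pairRows arr) m'
      · rw [pairRows_length, hlen, pow_succ]
        exact Nat.mul_div_cancel _ (by norm_num)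
      · exact pairRows_rows_ge m' arr hm
      · exact hdvd'
      · omega

-- ===== VERDICT (by name: the statement is the Claim_ definition above) =====
theorem polling_spec : Claim_equal_polling := by
  intro arr _ hpre
  obtain ⟨hne, ⟨k, hkle, hlen⟩, hrows, hdvd, hm0⟩ := hpre
  unfold Spec_polling polling
  exact main_eq k (arr.length + 1) arr (arr.headD []).length hlen hrows rfl (hlen ▸ hdvd) hm0 (by omega)
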